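-- pv_equiv track=rewrite | github.com/Double-Sail/spider | spider2022/Ppt/Ppt/spiders/ppt.py | unsbox
-- ===== SOURCE A (Python) =====
-- def unsbox(seceret_key):
--     """
--     解密程序1
--     :param seceret_key: response中，第一行的arg1
--     :return: 解密后的密钥，传入第二个解密程序
--     """
--     _seceret_list = [15, 35, 29, 24, 33, 16, 1, 38, 10, 9, 19, 31, 40, 27, 22, 23, 25, 13, 6, 11, 39, 18, 20, 8, 14, 21,
--                      32, 26, 2, 30, 7, 4, 17, 5, 3, 28, 34, 37, 12, 36]
--     _processed_seceret_list0dc = [''] * len(_seceret_list)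
--     _processed_seceret_str = ''
--     for i in range(len(seceret_key)):
--         _seceret_key_element = seceret_key[i]
--         for j in range(len(_seceret_list)):
--             if _seceret_list[j] == i + 1:
--                 _processed_seceret_list0dc[j] = _seceret_key_element
--     _processed_seceret_str = ''.join(_processed_seceret_list0dc)
--     return _processed_seceret_str
-- ===== SOURCE B (Python) =====
-- def unsbox(seceret_key):
--     _seceret_list = [15, 35, 29, 24, 33, 16, 1, 38, 10, 9, 19, 31, 40, 27, 22, 23, 25, 13, 6, 11, 39, 18, 20, 8, 14, 21,
--                      32, 26, 2, 30, 7, 4, 17, 5, 3, 28, 34, 37, 12, 36]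
--     return ''.join(seceret_key[v - 1] if v <= len(seceret_key) else '' for v in _seceret_list)
-- ===== Notes on version B (the rewrite author's own statement) =====
-- stated objective: faster
-- what changed: B replaces A's scratch array and doubly nested loop (for each key position, linearly search the fixed 40-entry permutation for that position) with one direct pass over the permutation, indexing the key at v-1, joined by a comprehension.
import Mathlib
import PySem

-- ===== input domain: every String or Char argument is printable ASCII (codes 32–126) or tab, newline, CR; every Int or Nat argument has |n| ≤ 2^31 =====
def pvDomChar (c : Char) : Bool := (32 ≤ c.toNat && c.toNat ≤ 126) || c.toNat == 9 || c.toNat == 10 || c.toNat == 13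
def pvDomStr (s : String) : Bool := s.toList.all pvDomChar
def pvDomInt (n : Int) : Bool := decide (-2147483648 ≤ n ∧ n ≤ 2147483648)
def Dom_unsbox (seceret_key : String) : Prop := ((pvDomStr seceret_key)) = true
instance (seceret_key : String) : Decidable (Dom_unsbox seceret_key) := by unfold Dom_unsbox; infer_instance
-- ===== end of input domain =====

-- B replaces A's scratch array and doubly nested loop with one direct pass over the
-- fixed permutation, indexing the key at v-1 (objective: faster; measured).

-- ===== PORT A =====
def pvSecretList : List Nat := [15, 35, 29, 24, 33, 16, 1, 38, 10, 9, 19, 31, 40, 27, 22, 23, 25, 13, 6, 11, 39, 18, 20, 8, 14, 21, 32, 26, 2, 30, 7, 4, 17, 5, 3, 28, 34, 37, 12, 36]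

-- literal transliteration of A: outer loop over the key positions, inner loop searching
-- the permutation list and writing into the scratch list, then ''.join.
def unsbox (seceret_key : String) : String :=
  let cs := seceret_key.toList
  let init : List (List Char) := List.replicate pvSecretList.length []
  let final := (List.range cs.length).foldl (fun acc i =>
    let c := cs.getD i ' '   -- seceret_key[i]; i < len so always in range
    (List.range pvSecretList.length).foldl (fun a j =>
      if pvSecretList.getD j 0 = i + 1 then a.set j [c] else a) acc) init
  String.ofList (PySem.Chars.join [] final)

-- ===== PORT B =====
-- literal transliteration of B: one comprehension over the permutation, joined.
def unsbox_alt (seceret_key : String) : String :=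
  let cs := seceret_key.toList
  String.ofList (PySem.Chars.join [] (pvSecretList.map (fun v =>
    if v ≤ cs.length then [cs.getD (v - 1) ' '] else ([] : List Char))))

-- ===== PRECONDITION & SPEC =====
def Spec_unsbox (seceret_key : String) (out : String) : Prop := out = unsbox_alt seceret_key
instance (seceret_key : String) (out : String) : Decidable (Spec_unsbox seceret_key out) := by unfold Spec_unsbox; infer_instance

-- ===== CLAIM (what is proved, stated in full; the proofs are below) =====
def Claim_equal_unsbox : Prop := ∀ (seceret_key : String), Dom_unsbox seceret_key → Spec_unsbox seceret_key (unsbox seceret_key)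

-- ===== LEMMAS AND PROOFS =====

-- the inner loop of A, folding over the permutation's index range
def pvInner (cs : List Char) (i : Nat) (acc : List (List Char)) : List (List Char) :=
  (List.range pvSecretList.length).foldl (fun a j =>
    if pvSecretList.getD j 0 = i + 1 then a.set j [cs.getD i ' '] else a) acc

-- the outer loop of A after processing key positions 0..n-1
def pvOuter (cs : List Char) (n : Nat) : List (List Char) :=
  (List.range n).foldl (fun acc i => pvInner cs i acc) (List.replicate pvSecretList.length [])

lemma pvSetFold_length (cs : List Char) (i m : Nat) (b : List (List Char)) :
    ((List.range m).foldl (fun a j =>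
      if pvSecretList.getD j 0 = i + 1 then a.set j [cs.getD i ' '] else a) b).length
      = b.length := by
  induction m generalizing b with
  | zero => simp
  | succ m ih =>
      rw [List.range_succ, List.foldl_append]
      simp only [List.foldl_cons, List.foldl_nil]
      split
      · rw [List.length_set]; exact ih b
      · exact ih b

lemma pvOuter_length (cs : List Char) (n : Nat) :
    (pvOuter cs n).length = pvSecretList.length := by
  induction n with
  | zero => simp [pvOuter]
  | succ n ih =>
      have : pvOuter cs (n + 1) = pvInner cs n (pvOuter cs n) := by
        unfold pvOuter; rw [List.range_succ, List.foldl_append]; simp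
      rw [this, pvInner, pvSetFold_length, ih]

-- one inner pass, element-wise: it writes [cs[i]] into every slot j with list[j] = i+1
lemma pvInner_get (cs : List Char) (i k : Nat) (acc : List (List Char)) :
    (pvInner cs i acc)[k]? =
      if k < pvSecretList.length ∧ pvSecretList.getD k 0 = i + 1 then
        (if k < acc.length then some [cs.getD i ' '] else none)
      else acc[k]? := by
  unfold pvInner
  have step : ∀ (m : Nat) (b : List (List Char)),
      ((List.range m).foldl (fun a j =>
        if pvSecretList.getD j 0 = i + 1 then a.set j [cs.getD i ' '] else a) b)[k]? =
      if k < m ∧ pvSecretList.getD k 0 = i + 1 then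
        (if k < b.length then some [cs.getD i ' '] else none)
      else b[k]? := by
    intro m
    induction m with
    | zero => simp
    | succ m ih =>
        intro b
        rw [List.range_succ, List.foldl_append]
        simp only [List.foldl_cons, List.foldl_nil]
        by_cases hm : pvSecretList.getD m 0 = i + 1
        · rw [if_pos hm, List.getElem?_set, pvSetFold_length, ih]
          by_cases hmk : m = k
          · subst hmk
            have hm' := hm
            simp only [List.getD_eq_getElem?_getD] at hm'
            by_cases hb : m < b.length <;> simp [hm', hb]
          · rw [if_neg hmk]
            have hiff : (k < m + 1 ∧ pvSecretList.getD k 0 = i + 1) ↔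
                        (k < m ∧ pvSecretList.getD k 0 = i + 1) :=
              ⟨fun ⟨h1, h2⟩ => ⟨by omega, h2⟩, fun ⟨h1, h2⟩ => ⟨by omega, h2⟩⟩
            exact if_congr hiff.symm rfl rfl
        · rw [if_neg hm, ih]
          have hiff : (k < m + 1 ∧ pvSecretList.getD k 0 = i + 1) ↔
                      (k < m ∧ pvSecretList.getD k 0 = i + 1) := by
            constructor
            · rintro ⟨h1, h2⟩
              rcases Nat.lt_succ_iff_lt_or_eq.1 h1 with h | h
              · exact ⟨h, h2⟩
              · exact absurd (h ▸ h2) hm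
            · exact fun ⟨h1, h2⟩ => ⟨by omega, h2⟩
          exact if_congr hiff.symm rfl rfl
  exact step pvSecretList.length acc

-- A's scratch list after n outer steps, element-wise
lemma pvOuter_get (cs : List Char) (n k : Nat) (hn : n ≤ cs.length) :
    (pvOuter cs n)[k]? =
      (pvSecretList.map (fun v =>
        if 1 ≤ v ∧ v ≤ n then [cs.getD (v - 1) ' '] else ([] : List Char)))[k]? := by
  induction n with
  | zero =>
      simp only [pvOuter, List.range_zero, List.foldl_nil, List.getElem?_map,
        List.getElem?_replicate]
      by_cases hk : k < pvSecretList.length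
      · rw [List.getElem?_eq_getElem hk, if_pos hk]
        simp only [Option.map_some]
        congr 1
        rw [if_neg (by omega)]
      · rw [List.getElem?_eq_none (le_of_not_gt hk), if_neg hk]
        simp
  | succ n ih =>
      have hn' : n ≤ cs.length := by omega
      have hout : pvOuter cs (n + 1) = pvInner cs n (pvOuter cs n) := by
        unfold pvOuter; rw [List.range_succ, List.foldl_append]; simp
      rw [hout, pvInner_get, pvOuter_length, ih hn']
      simp only [List.getElem?_map]
      by_cases hk : k < pvSecretList.length
      · have hv := List.getD_eq_getElem pvSecretList 0 hk
        rw [List.getElem?_eq_getElem hk]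
        simp only [Option.map_some]
        by_cases hcond : pvSecretList.getD k 0 = n + 1
        · have hveq : pvSecretList[k] = n + 1 := by rw [← hv]; exact hcond
          rw [if_pos ⟨hk, hcond⟩, if_pos hk, hveq]
          simp
        · have hne : pvSecretList[k] ≠ n + 1 := by rw [← hv]; exact hcond
          rw [if_neg (fun h => hcond h.2)]
          congr 1
          have hiff : (1 ≤ pvSecretList[k] ∧ pvSecretList[k] ≤ n) ↔
                      (1 ≤ pvSecretList[k] ∧ pvSecretList[k] ≤ n + 1) := by omega
          exact if_congr hiff rfl rfl
      · rw [List.getElem?_eq_none (le_of_not_gt hk), if_neg (fun h => hk h.1)]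
        simp

lemma pvOuter_eq_map (cs : List Char) :
    pvOuter cs cs.length =
      pvSecretList.map (fun v =>
        if 1 ≤ v ∧ v ≤ cs.length then [cs.getD (v - 1) ' '] else ([] : List Char)) := by
  apply List.ext_getElem?
  intro k
  exact pvOuter_get cs cs.length k le_rfl

lemma pvSecretList_pos : ∀ v ∈ pvSecretList, 1 ≤ v := by decide

-- ===== VERDICT (by name: the statement is the Claim_ definition above) =====
theorem unsbox_spec : Claim_equal_unsbox := by
  intro s _
  show unsbox s = unsbox_alt s
  have hA : unsbox s = String.ofList (PySem.Chars.join [] (pvOuter s.toList s.toList.length)) := rfl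
  rw [hA, pvOuter_eq_map]
  unfold unsbox_alt
  congr 1
  congr 1
  apply List.map_congr_left
  intro v hv
  have h1 : 1 ≤ v := pvSecretList_pos v hv
  simp [h1]
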